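-- pv_equiv track=rewrite | github.com/kaluginpeter/Algorithms_and_structures_tasks | CodeWars/6kyu/Most_Consecutive_Zeros_of_a_Binary_Number.py | max_consec_zeros
-- ===== SOURCE A (Python) =====
-- def max_consec_zeros(s):
--     words: dict = {0: "Zero", 1: "One", 2: "Two", 3: "Three",
--                   4: 'Four', 5: 'Five', 6: 'Six', 7: 'Seven',
--                   8: 'Eight', 9: 'Nine', 10: 'Ten', 11: 'Eleven',
--                   12: 'Twelve', 13: 'Thirteen'}
--     top: int = 0
--     seq: int = 0
--     for i in bin(int(s))[2:]:
--         if i == '0':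
--             seq += 1
--             top = max(top, seq)
--         else:
--             seq = 0
--     return words[top]
-- ===== SOURCE B (Python) =====
-- def max_consec_zeros(s):
--     words: dict = {0: "Zero", 1: "One", 2: "Two", 3: "Three",
--                    4: 'Four', 5: 'Five', 6: 'Six', 7: 'Seven',
--                    8: 'Eight', 9: 'Nine', 10: 'Ten', 11: 'Eleven',
--                    12: 'Twelve', 13: 'Thirteen'}
--     # collect all maximal zero-runs at once: split the binary digits of |n| on '1';
--     # every piece is a (possibly empty) run of zeros.  abs() avoids the '-0b' prefix,
--     # whose digits are those of |n|, so the longest zero-run is unchanged.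
--     segments = format(abs(int(s)), 'b').split('1')
--     top = max(len(seg) for seg in segments)
--     return words[top]
-- ===== Notes on version B (the rewrite author's own statement) =====
-- stated objective: simpler
-- what changed: Replaces the incremental top/seq accumulator loop over the '0b'-sliced binary string with a collect-then-reduce decomposition: split the binary digits of abs(n) on '1' and take the max segment length.
import Mathlib
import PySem

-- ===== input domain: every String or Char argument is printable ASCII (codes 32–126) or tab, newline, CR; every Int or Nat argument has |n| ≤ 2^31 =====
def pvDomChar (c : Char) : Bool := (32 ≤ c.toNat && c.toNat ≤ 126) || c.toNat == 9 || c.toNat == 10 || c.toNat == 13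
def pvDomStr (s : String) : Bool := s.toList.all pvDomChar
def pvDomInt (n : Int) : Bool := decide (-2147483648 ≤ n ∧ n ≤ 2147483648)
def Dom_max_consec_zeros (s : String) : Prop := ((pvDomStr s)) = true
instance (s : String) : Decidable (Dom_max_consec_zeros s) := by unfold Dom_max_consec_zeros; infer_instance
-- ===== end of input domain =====

-- B replaces A's incremental top/seq accumulator loop with a collect-then-reduce decomposition
-- (split the binary digits of |n| on '1', take the max segment length); same cost, simpler shape.

-- ===== PORT A =====
-- the shared number-word table {0: "Zero", …, 13: "Thirteen"}
def pvWords : PySem.Dict Int String := PySem.Dict.ofList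
  [(0, "Zero"), (1, "One"), (2, "Two"), (3, "Three"),
   (4, "Four"), (5, "Five"), (6, "Six"), (7, "Seven"),
   (8, "Eight"), (9, "Nine"), (10, "Ten"), (11, "Eleven"),
   (12, "Twelve"), (13, "Thirteen")]

-- the loop body: if i == '0': seq += 1; top = max(top, seq); else: seq = 0   (state = (top, seq))
def pvStepA (st : Int × Int) (i : Char) : Int × Int :=
  if i = '0' then (max st.1 (st.2 + 1), st.2 + 1) else (st.1, 0)

def max_consec_zeros (s : String) : String :=
  match PySem.Int.ofStr? s with
  | none => ""        -- int(s) raises ValueError here; excluded by Pre_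
  | some n =>
    let st := (PySem.List.slice (PySem.Int.toBinChars0b n) (some 2) none).foldl pvStepA (0, 0)
    ((pvWords.get? st.1).getD "")   -- words[top] raises KeyError when top > 13; excluded by Pre_

-- ===== PORT B =====
def max_consec_zeros_alt (s : String) : String :=
  match PySem.Int.ofStr? s with
  | none => ""        -- int(s) raises ValueError here; excluded by Pre_
  | some n =>
    let segments := PySem.Chars.splitOn (PySem.Int.toBinChars (n.natAbs : Int)) ['1']
    -- max(len(seg) for seg in segments): split never returns an empty list, so max() cannot raise
    let top := (PySem.List.max? (segments.map fun seg => (seg.length : Int)) (fun x => x)).getD 0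
    ((pvWords.get? top).getD "")   -- words[top] raises KeyError when top > 13; excluded by Pre_

-- ===== PRECONDITION & SPEC =====
-- Pre_ excludes exactly the inputs where the Python A raises: strings int() rejects (ValueError)
-- and numbers whose binary form contains 14 consecutive zeros (KeyError in words[top]).
def Pre_max_consec_zeros (s : String) : Prop :=
  (PySem.Int.ofStr? s).any
    (fun n => !decide (List.replicate 14 '0' <:+: PySem.Int.toBinChars n)) = true
instance (s : String) : Decidable (Pre_max_consec_zeros s) := by
  unfold Pre_max_consec_zeros; infer_instance
def pvWitness_max_consec_zeros : String := "-37"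
def Spec_max_consec_zeros (s : String) (out : String) : Prop := out = max_consec_zeros_alt s
instance (s : String) (out : String) : Decidable (Spec_max_consec_zeros s out) := by
  unfold Spec_max_consec_zeros; infer_instance

-- ===== CLAIM (what is proved, stated in full; the proofs are below) =====
def Claim_equal_max_consec_zeros : Prop := ∀ (s : String), Dom_max_consec_zeros s → Pre_max_consec_zeros s → Spec_max_consec_zeros s (max_consec_zeros s)

-- ===== LEMMAS AND PROOFS =====

-- clean structural recursion computing split-on-'1' (proof helper)
def pvSplitZ : List Char → List (List Char)
  | [] => [[]]
  | c :: rest => if c = '1' then [] :: pvSplitZ rest else (pvSplitZ rest).modifyHead (c :: ·)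

-- (q + first) :: rest — the first zero-run extended by the pending run length q
def pvAddq (q : Int) : List Int → List Int
  | [] => []
  | x :: xs => (q + x) :: xs

lemma pvSplitZ_ne_nil (cs : List Char) : pvSplitZ cs ≠ [] := by
  induction cs with
  | nil => simp [pvSplitZ]
  | cons c rest ih =>
    simp only [pvSplitZ]
    split
    · simp
    · cases h : pvSplitZ rest with
      | nil => exact absurd h ih
      | cons a t => simp [List.modifyHead]

lemma pvGo_eq (fuel : ℕ) (l cur acc : _) (h : l.length < fuel) :
    PySem.Chars.splitOn.go ['1'] fuel l cur acc
      = acc.reverse ++ (pvSplitZ l).modifyHead (cur.reverse ++ ·) := by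
  induction fuel generalizing l cur acc with
  | zero => omega
  | succ fuel ih =>
    cases l with
    | nil => simp [PySem.Chars.splitOn.go, pvSplitZ, List.modifyHead]
    | cons c rest =>
      simp only [PySem.Chars.splitOn.go, pvSplitZ]
      by_cases hc : c = '1'
      · subst hc
        rw [if_pos (by simp [List.isPrefixOf])]
        rw [ih _ _ _ (by simpa using Nat.lt_of_succ_lt_succ h)]
        cases hr : pvSplitZ rest with
        | nil => exact absurd hr (pvSplitZ_ne_nil rest)
        | cons a t => simp [List.modifyHead, hr]
      · rw [if_neg (by simp [List.isPrefixOf]; exact fun h => hc h.symm)]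
        rw [ih _ _ _ (by simpa using Nat.lt_of_succ_lt_succ h), if_neg hc]
        cases hr : pvSplitZ rest with
        | nil => exact absurd hr (pvSplitZ_ne_nil rest)
        | cons a t => simp [List.modifyHead]

-- PySem.Chars.splitOn with a single-char separator is the structural split
lemma pvSplit_eq (cs : List Char) :
    PySem.Chars.splitOn cs ['1'] = pvSplitZ cs := by
  unfold PySem.Chars.splitOn
  rw [pvGo_eq _ _ _ _ (by omega)]
  cases h : pvSplitZ cs with
  | nil => exact absurd h (pvSplitZ_ne_nil cs)
  | cons a t => simp [List.modifyHead]

-- every binary digit produced by Nat.toDigits 2 is '0' or '1'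
lemma pvToDigitsCore_mem (fuel n : ℕ) (ds : List Char)
    (h : ∀ c ∈ ds, c = '0' ∨ c = '1') :
    ∀ c ∈ Nat.toDigitsCore 2 fuel n ds, c = '0' ∨ c = '1' := by
  induction fuel generalizing n ds with
  | zero => simpa [Nat.toDigitsCore] using h
  | succ fuel ih =>
    have hd : (n % 2).digitChar = '0' ∨ (n % 2).digitChar = '1' := by
      rcases Nat.mod_two_eq_zero_or_one n with h2 | h2 <;> simp [h2, Nat.digitChar]
    have hcons : ∀ c ∈ (n % 2).digitChar :: ds, c = '0' ∨ c = '1' := by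
      intro c hc
      rcases List.mem_cons.mp hc with hc | hc
      · subst hc; exact hd
      · exact h c hc
    simp only [Nat.toDigitsCore]
    split
    · exact hcons
    · exact ih _ _ hcons

lemma pvToDigits_mem (m : ℕ) : ∀ c ∈ Nat.toDigits 2 m, c = '0' ∨ c = '1' :=
  pvToDigitsCore_mem _ _ [] (by simp)

-- loop invariant: A's fold computes the running max of the zero-run lengths of the split
lemma pvFold_eq (cs : List Char) (t q : Int) (hq0 : 0 ≤ q) (hq : q ≤ t)
    (hcs : ∀ c ∈ cs, c = '0' ∨ c = '1') :
    (cs.foldl pvStepA (t, q)).1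
      = List.foldl max t (pvAddq q ((pvSplitZ cs).map (fun seg => (seg.length : Int)))) := by
  induction cs generalizing t q with
  | nil => simp [pvSplitZ, pvAddq, max_eq_left hq]
  | cons c rest ih =>
    have hrest : ∀ x ∈ rest, x = '0' ∨ x = '1' := fun x hx => hcs x (List.mem_cons_of_mem _ hx)
    rcases hcs c (List.mem_cons_self ..) with hc | hc <;> subst hc
    · -- c = '0'
      simp only [List.foldl_cons, pvStepA, pvSplitZ]
      simp only [if_true]
      rw [if_neg (show ¬('0':Char) = '1' by decide)]
      rw [ih (max t (q + 1)) (q + 1) (by omega) (le_max_right _ _) hrest]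
      cases hr : pvSplitZ rest with
      | nil => exact absurd hr (pvSplitZ_ne_nil rest)
      | cons a tl =>
        simp only [List.modifyHead, List.map_cons, pvAddq, List.foldl_cons,
          List.length_cons]
        congr 1
        rw [max_assoc, max_eq_right (le_add_of_nonneg_right (Int.natCast_nonneg _))]
        push_cast
        ring_nf
    · -- c = '1'
      simp only [List.foldl_cons, pvStepA, pvSplitZ]
      simp only [if_true]
      rw [if_neg (show ¬('1':Char) = '0' by decide)]
      rw [ih t 0 le_rfl (le_trans hq0 hq) hrest]
      cases hr : pvSplitZ rest with
      | nil => exact absurd hr (pvSplitZ_ne_nil rest)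
      | cons a tl =>
        simp only [List.map_cons, pvAddq, List.foldl_cons, zero_add]
        congr 1
        simp only [List.length_nil, Nat.cast_zero, add_zero, max_eq_left hq]

-- both ports compute the same top for the binary digits of |n|
lemma pvTops_eq (n : Int) :
    ((PySem.List.slice (PySem.Int.toBinChars0b n) (some 2) none).foldl pvStepA (0, 0)).1
      = ((PySem.List.max?
            ((PySem.Chars.splitOn (PySem.Int.toBinChars (n.natAbs : Int)) ['1']).map
              fun seg => (seg.length : Int)) (fun x => x)).getD 0) := by
  have hB : PySem.Int.toBinChars (n.natAbs : Int) = Nat.toDigits 2 n.natAbs := by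
    unfold PySem.Int.toBinChars
    rw [if_neg (by omega), Int.toNat_natCast]
  have hfold : ∀ cs : List Char, (∀ c ∈ cs, c = '0' ∨ c = '1') →
      (cs.foldl pvStepA (0, 0)).1
        = ((PySem.List.max? ((pvSplitZ cs).map fun seg => (seg.length : Int))
              (fun x => x)).getD 0) := by
    intro cs hcs
    rw [pvFold_eq cs 0 0 le_rfl le_rfl hcs]
    cases hr : pvSplitZ cs with
    | nil => exact absurd hr (pvSplitZ_ne_nil cs)
    | cons a tl =>
      rw [List.map_cons, PySem.List.max?_id_cons, Option.getD_some]
      simp only [pvAddq, zero_add, List.foldl_cons,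
        max_eq_right (Int.natCast_nonneg a.length)]
  rw [hB, pvSplit_eq]
  by_cases hn : n < 0
  · have : PySem.List.slice (PySem.Int.toBinChars0b n) (some 2) none
        = 'b' :: Nat.toDigits 2 n.natAbs := by
      rw [PySem.List.slice_from (PySem.Int.toBinChars0b n) (by norm_num : (0:Int) ≤ 2)]
      simp [PySem.Int.toBinChars0b, if_pos hn]
    rw [this, List.foldl_cons, show pvStepA (0, 0) 'b' = (0, 0) by decide]
    exact hfold _ (pvToDigits_mem _)
  · have hna : n.toNat = n.natAbs := by omega
    have : PySem.List.slice (PySem.Int.toBinChars0b n) (some 2) none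
        = Nat.toDigits 2 n.natAbs := by
      rw [PySem.List.slice_from (PySem.Int.toBinChars0b n) (by norm_num : (0:Int) ≤ 2)]
      simp [PySem.Int.toBinChars0b, if_neg hn, hna]
    rw [this]
    exact hfold _ (pvToDigits_mem _)

-- ===== VERDICT (by name: the statement is the Claim_ definition above) =====
theorem max_consec_zeros_spec : Claim_equal_max_consec_zeros := by
  intro s _ _
  unfold Spec_max_consec_zeros max_consec_zeros max_consec_zeros_alt
  cases h : PySem.Int.ofStr? s with
  | none => rfl
  | some n => simp only [pvTops_eq n]
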